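-- pv_equiv track=rewrite | github.com/valeriiaradzivilo/Lerogram | funcs_logic.py | find_max_vert
-- ===== SOURCE A (Python) =====
-- def find_max_vert(yel_dots):
--     # Black horizontals
--     amounts_bl_horiz = []
--     for j in range(15):
--         result = 0
--         max_bl = 0
--         for i in range(15):
--             if (i, j, 'y') not in yel_dots:
--                 max_bl += 1
--                 if (i + 1, j, 'y') in yel_dots:
--                     if max_bl >= result:
--                         result = max_bl
--                     max_bl = 0
--         amounts_bl_horiz.append(result)
--
--     # Yellow verticals
--     amounts_yel_horiz = []
--
--     for j in range(15):
--         max_yel = 0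
--         result_yel = 0
--         for i in range(15):
--             if (i, j, 'y') in yel_dots:
--                 max_yel += 1
--                 if (i + 1, j, 'y') not in yel_dots or i + 1 == 15:
--                     if max_yel >= result_yel:
--                         result_yel = max_yel
--                     max_yel = 0
--         amounts_yel_horiz.append(result_yel)
--
--     return amounts_bl_horiz, amounts_yel_horiz
-- ===== SOURCE B (Python) =====
-- def find_max_vert(yel_dots):
--     dots = set(yel_dots)
--     blacks, yellows = [], []
--     for j in range(15):
--         ys = [i for i in range(15) if (i, j, 'y') in dots]
--         # black: longest gap of black rows that precedes a yellow row
--         # (leading gap counts in full; the trailing gap is never counted)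
--         best_b = 0
--         prev = -1
--         for y in ys:
--             best_b = max(best_b, y - prev - 1)
--             prev = y
--         # yellow: longest run of consecutive yellow rows
--         best_y = 0
--         cur = 0
--         prev = -2
--         for y in ys:
--             cur = cur + 1 if y == prev + 1 else 1
--             best_y = max(best_y, cur)
--             prev = y
--         blacks.append(best_b)
--         yellows.append(best_y)
--     return blacks, yellows
-- ===== Notes on version B (the rewrite author's own statement) =====
-- stated objective: alternative
-- what changed: Instead of probing membership of (i,j,'y') and (i+1,j,'y') for every cell of every column, B builds a set of the dots once, collects each column's sorted yellow row indices, and derives the black answer as the largest gap preceding a yellow row and the yellow answer as the longest run of consecutive indices in one short scan of that index list.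
import Mathlib
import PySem

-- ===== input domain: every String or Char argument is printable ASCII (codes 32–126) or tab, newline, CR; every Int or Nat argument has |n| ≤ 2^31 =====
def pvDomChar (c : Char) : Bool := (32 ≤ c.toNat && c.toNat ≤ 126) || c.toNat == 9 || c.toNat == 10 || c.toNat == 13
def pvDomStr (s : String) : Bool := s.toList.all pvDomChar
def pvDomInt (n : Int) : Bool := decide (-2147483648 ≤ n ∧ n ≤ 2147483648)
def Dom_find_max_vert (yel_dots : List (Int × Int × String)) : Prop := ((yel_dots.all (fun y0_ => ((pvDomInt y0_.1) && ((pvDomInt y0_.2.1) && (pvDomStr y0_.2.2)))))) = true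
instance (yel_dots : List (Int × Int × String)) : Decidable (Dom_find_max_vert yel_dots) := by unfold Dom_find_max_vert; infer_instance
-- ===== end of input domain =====

-- B replaces A's per-cell membership probes (with lookahead at i+1) by one pass per column over
-- the sorted list of yellow row indices: black = largest gap preceding a yellow row, yellow =
-- longest run of consecutive indices. Same return value on all inputs admitted by Pre_.

-- ===== PORT A =====
-- inner loop of A's first j-loop (rows i, state = (result, max_bl))
def pvBlackRowA (yel : List (Int × Int × String)) (j : Int) : List Int → Int → Int → Int
  | [], result, _ => result
  | i :: rest, result, max_bl =>
    if ¬ ((i, j, "y") ∈ yel) then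
      (if (i + 1, j, "y") ∈ yel then
        pvBlackRowA yel j rest (if max_bl + 1 ≥ result then max_bl + 1 else result) 0
      else
        pvBlackRowA yel j rest result (max_bl + 1))
    else
      pvBlackRowA yel j rest result max_bl

-- inner loop of A's second j-loop (rows i, state = (result_yel, max_yel))
def pvYellowRowA (yel : List (Int × Int × String)) (j : Int) : List Int → Int → Int → Int
  | [], result_yel, _ => result_yel
  | i :: rest, result_yel, max_yel =>
    if (i, j, "y") ∈ yel then
      (if ¬ ((i + 1, j, "y") ∈ yel) ∨ i + 1 = 15 then
        pvYellowRowA yel j rest (if max_yel + 1 ≥ result_yel then max_yel + 1 else result_yel) 0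
      else
        pvYellowRowA yel j rest result_yel (max_yel + 1))
    else
      pvYellowRowA yel j rest result_yel max_yel

def find_max_vert (yel_dots : List (Int × Int × String)) : List Int × List Int :=
  let amounts_bl_horiz :=
    (PySem.List.pyRange 0 15 1).foldl
      (fun acc j => acc ++ [pvBlackRowA yel_dots j (PySem.List.pyRange 0 15 1) 0 0]) []
  let amounts_yel_horiz :=
    (PySem.List.pyRange 0 15 1).foldl
      (fun acc j => acc ++ [pvYellowRowA yel_dots j (PySem.List.pyRange 0 15 1) 0 0]) []
  (amounts_bl_horiz, amounts_yel_horiz)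

-- ===== PORT B =====
-- 'for y in ys: best_b = max(best_b, y - prev - 1); prev = y'
def pvGapScan : List Int → Int → Int → Int
  | [], best, _ => best
  | y :: t, best, prev => pvGapScan t (max best (y - prev - 1)) y

-- 'for y in ys: cur = cur + 1 if y == prev + 1 else 1; best_y = max(best_y, cur); prev = y'
def pvRunScan : List Int → Int → Int → Int → Int
  | [], best, _, _ => best
  | y :: t, best, cur, prev =>
    pvRunScan t (max best (if y = prev + 1 then cur + 1 else 1)) (if y = prev + 1 then cur + 1 else 1) y

def find_max_vert_alt (yel_dots : List (Int × Int × String)) : List Int × List Int :=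
  let dots : PySem.Set (Int × Int × String) := PySem.Set.ofList yel_dots
  (PySem.List.pyRange 0 15 1).foldl
    (fun (acc : List Int × List Int) j =>
      let ys := (PySem.List.pyRange 0 15 1).filter (fun i => PySem.Set.contains dots (i, j, "y"))
      (acc.1 ++ [pvGapScan ys 0 (-1)], acc.2 ++ [pvRunScan ys 0 0 (-2)]))
    ([], [])

-- ===== PRECONDITION & SPEC =====
-- Pre_ restricts to the natural domain (grid rows are 0..14): it excludes malformed inputs that
-- contain an out-of-grid dot (15, j, 'y'), the only dots A's lookahead probe at i+1 = 15 can see.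
def Pre_find_max_vert (yel_dots : List (Int × Int × String)) : Prop :=
  ∀ p ∈ yel_dots, ¬ (p.1 = 15 ∧ p.2.2 = "y")
instance (yel_dots : List (Int × Int × String)) : Decidable (Pre_find_max_vert yel_dots) := by
  unfold Pre_find_max_vert; infer_instance

def pvWitness_find_max_vert : (List (Int × Int × String)) := [(0, 0, "y"), (2, 0, "y")]

def Spec_find_max_vert (yel_dots : List (Int × Int × String)) (out : List Int × List Int) : Prop := out = find_max_vert_alt yel_dots
instance (yel_dots : List (Int × Int × String)) (out : List Int × List Int) : Decidable (Spec_find_max_vert yel_dots out) := by unfold Spec_find_max_vert; infer_instance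

-- ===== CLAIM (what is proved, stated in full; the proofs are below) =====
def Claim_equal_find_max_vert : Prop := ∀ (yel_dots : List (Int × Int × String)), Dom_find_max_vert yel_dots → Pre_find_max_vert yel_dots → Spec_find_max_vert yel_dots (find_max_vert yel_dots)

-- ===== LEMMAS AND PROOFS =====

theorem pv_contains_ofList {α : Type} [BEq α] [LawfulBEq α] (l : List α) (x : α) :
    PySem.Set.contains (PySem.Set.ofList l) x = decide (x ∈ l) := by
  rw [Bool.eq_iff_iff]
  simp [PySem.Set.mem_ofList]

theorem pv_if_ge_max (a b : Int) : (if a ≥ b then a else b) = max b a := by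
  split_ifs <;> omega

-- black-column invariant: A's row loop from row 15-n equals B's gap scan of the
-- yellow indices ≥ 15-n, with prev = (15-n) - m - 1 encoding the pending black run m
theorem pv_black_inv (yel : List (Int × Int × String)) (j : Int)
    (h15 : (15, j, "y") ∉ yel) :
    ∀ n : Nat, n ≤ 15 → ∀ r m : Int, 0 ≤ r → 0 ≤ m →
      (0 < m → ((15 - (n : Int), j, "y") ∉ yel)) →
      pvBlackRowA yel j (PySem.List.pyRange (15 - (n : Int)) 15 1) r m
        = pvGapScan ((PySem.List.pyRange (15 - (n : Int)) 15 1).filter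
            (fun i => decide ((i, j, "y") ∈ yel))) r (15 - (n : Int) - m - 1) := by
  intro n
  induction n with
  | zero =>
    intro _ r m hr hm _
    rw [PySem.List.pyRange_one_eq_nil (by norm_num)]
    simp [pvBlackRowA, pvGapScan]
  | succ n ih =>
    intro hn r m hr hm hflush
    have hc : (15 - ((n + 1 : Nat) : Int)) = 14 - (n : Int) := by push_cast; ring
    rw [hc] at hflush ⊢
    have hnn : (0 : Int) ≤ (n : Int) := Int.natCast_nonneg n
    have hn15 : (n : Int) ≤ 14 := by exact_mod_cast (by omega : n ≤ 14)
    have ha1 : (14 - (n : Int)) + 1 = 15 - (n : Int) := by ring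
    rw [PySem.List.pyRange_one_cons (by omega)]
    by_cases c1 : (((14 - (n : Int)), j, "y") ∈ yel)
    · have hm0 : m = 0 := by
        by_contra h
        exact hflush (by omega) c1
      subst hm0
      rw [List.filter_cons_of_pos (by simpa using c1)]
      simp only [pvBlackRowA, pvGapScan]
      rw [if_neg (not_not_intro c1)]
      have e1 : 14 - (n : Int) - (14 - (n : Int) - 0 - 1) - 1 = 0 := by ring
      rw [e1, max_eq_left hr, ha1]
      have h0 := ih (by omega) r 0 hr le_rfl (by intro h; omega)
      have e2 : 15 - (n : Int) - 0 - 1 = 14 - (n : Int) := by ring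
      rw [e2] at h0
      exact h0
    · by_cases c2 : (((14 - (n : Int)) + 1, j, "y") ∈ yel)
      · have c2' : ((15 - (n : Int)), j, "y") ∈ yel := ha1 ▸ c2
        have hn1 : 1 ≤ n := by
          rcases Nat.eq_zero_or_pos n with h | h
          · subst h
            norm_num at c2'
            exact absurd c2' h15
          · exact h
        have hf : List.filter (fun i => decide ((i, j, "y") ∈ yel))
              (PySem.List.pyRange (15 - (n : Int)) 15 1)
            = (15 - (n : Int)) :: List.filter (fun i => decide ((i, j, "y") ∈ yel))
                (PySem.List.pyRange (15 - (n : Int) + 1) 15 1) := by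
          rw [PySem.List.pyRange_one_cons (by omega), List.filter_cons_of_pos (by simpa using c2')]
        simp only [pvBlackRowA]
        rw [if_pos c1, if_pos c2, pv_if_ge_max, ha1]
        have h0 := ih (by omega) (max r (m + 1)) 0 (le_trans hr (le_max_left _ _)) le_rfl
          (fun h => absurd h (by omega))
        rw [h0, List.filter_cons_of_neg (by simpa using c1), hf]
        simp only [pvGapScan]
        congr 1
        have e1 : 15 - (n : Int) - (15 - (n : Int) - 0 - 1) - 1 = 0 := by ring
        have e2 : 15 - (n : Int) - (14 - (n : Int) - m - 1) - 1 = m + 1 := by ring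
        rw [e1, e2, max_eq_left (le_trans hr (le_max_left _ _))]
      · have c2' : ((15 - (n : Int)), j, "y") ∉ yel := ha1 ▸ c2
        rw [List.filter_cons_of_neg (by simpa using c1)]
        simp only [pvBlackRowA]
        rw [if_pos c1, if_neg c2, ha1]
        have h0 := ih (by omega) r (m + 1) hr (by omega) (fun _ => c2')
        have e2 : 15 - (n : Int) - (m + 1) - 1 = 14 - (n : Int) - m - 1 := by ring
        rw [e2] at h0
        exact h0

-- yellow-column invariant
theorem pv_yellow_inv (yel : List (Int × Int × String)) (j : Int) :
    ∀ n : Nat, n ≤ 15 → ∀ res y best cur prev : Int, 0 ≤ res → 0 ≤ y →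
      (0 < y → ((15 - (n : Int), j, "y") ∈ yel ∧ n ≠ 0 ∧ prev = 15 - (n : Int) - 1 ∧ cur = y ∧ best = max res y)) →
      (y = 0 → best = res ∧ (prev + 1 < 15 - (n : Int) ∨ ((prev + 1, j, "y") ∉ yel) ∨ 15 ≤ prev + 1)) →
      pvYellowRowA yel j (PySem.List.pyRange (15 - (n : Int)) 15 1) res y
        = pvRunScan ((PySem.List.pyRange (15 - (n : Int)) 15 1).filter
            (fun i => decide ((i, j, "y") ∈ yel))) best cur prev := by
  intro n
  induction n with
  | zero =>
    intro _ res y best cur prev hres hy hpos h0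
    have hy0 : y = 0 := by
      by_contra h
      exact (hpos (by omega)).2.1 rfl
    subst hy0
    rw [PySem.List.pyRange_one_eq_nil (by norm_num)]
    simp [pvYellowRowA, pvRunScan, (h0 rfl).1]
  | succ n ih =>
    intro hn res y best cur prev hres hy hpos h0
    have hc : (15 - ((n + 1 : Nat) : Int)) = 14 - (n : Int) := by push_cast; ring
    rw [hc] at hpos h0 ⊢
    have hnn : (0 : Int) ≤ (n : Int) := Int.natCast_nonneg n
    have hn15 : (n : Int) ≤ 14 := by exact_mod_cast (by omega : n ≤ 14)
    have ha1 : (14 - (n : Int)) + 1 = 15 - (n : Int) := by ring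
    rw [PySem.List.pyRange_one_cons (by omega)]
    by_cases cA : (((14 - (n : Int)), j, "y") ∈ yel)
    · have hcur : (if (14 - (n : Int)) = prev + 1 then cur + 1 else 1) = y + 1 := by
        by_cases hp : (14 - (n : Int)) = prev + 1
        · rw [if_pos hp]
          by_cases hy' : 0 < y
          · rw [(hpos hy').2.2.2.1]
          · have hz := h0 (by omega)
            rcases hz.2 with h | h | h
            · omega
            · exact absurd (hp ▸ cA) h
            · omega
        · rw [if_neg hp]
          by_cases hy' : 0 < y
          · have hprev := (hpos hy').2.2.1
            exact absurd (by omega) hp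
          · omega
      have hbest : max best (y + 1) = max res (y + 1) := by
        by_cases hy' : 0 < y
        · rw [(hpos hy').2.2.2.2, max_assoc, max_eq_right (by omega : y ≤ y + 1)]
        · have hz : y = 0 := by omega
          subst hz
          rw [(h0 rfl).1]
      rw [List.filter_cons_of_pos (by simpa using cA)]
      simp only [pvRunScan]
      rw [hcur, hbest]
      simp only [pvYellowRowA]
      rw [if_pos cA]
      by_cases cB : (¬ (((14 - (n : Int)) + 1, j, "y") ∈ yel) ∨ (14 - (n : Int)) + 1 = 15)
      · rw [if_pos cB, pv_if_ge_max, ha1]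
        refine ih (by omega) (max res (y + 1)) 0 (max res (y + 1)) (y + 1) (14 - (n : Int))
          (le_trans hres (le_max_left _ _)) le_rfl (fun h => absurd h (by omega)) ?_
        intro _
        refine ⟨rfl, ?_⟩
        rcases cB with h | h
        · right; left; exact h
        · right; right; omega
      · rw [if_neg cB, ha1]
        push_neg at cB
        refine ih (by omega) res (y + 1) (max res (y + 1)) (y + 1) (14 - (n : Int))
          hres (by omega) ?_ (fun h => absurd h (by omega))
        intro _
        refine ⟨ha1 ▸ cB.1, ?_, by omega, rfl, rfl⟩
        intro h
        rw [h] at cB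
        norm_num at cB
    · have hy0 : y = 0 := by
        by_contra h
        exact cA (hpos (by omega)).1
      subst hy0
      rw [List.filter_cons_of_neg (by simpa using cA)]
      simp only [pvYellowRowA]
      rw [if_neg cA, ha1]
      refine ih (by omega) res 0 best cur prev hres le_rfl (fun h => absurd h (by omega)) ?_
      intro _
      refine ⟨(h0 rfl).1, ?_⟩
      rcases (h0 rfl).2 with h | h | h
      · left; omega
      · right; left; exact h
      · right; right; exact h

theorem pv_foldl_app (f : Int → Int) :
    ∀ (l : List Int) (acc : List Int),
      l.foldl (fun a j => a ++ [f j]) acc = acc ++ l.map f := by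
  intro l
  induction l with
  | nil => simp
  | cons x t ih => intro acc; simp [List.foldl_cons, ih]

theorem pv_foldl_pair (f g : Int → Int) :
    ∀ (l : List Int) (acc : List Int × List Int),
      l.foldl (fun (a : List Int × List Int) j => (a.1 ++ [f j], a.2 ++ [g j])) acc
        = (acc.1 ++ l.map f, acc.2 ++ l.map g) := by
  intro l
  induction l with
  | nil => simp
  | cons x t ih => intro acc; simp [List.foldl_cons, ih]

-- ===== VERDICT (by name: the statement is the Claim_ definition above) =====
theorem find_max_vert_spec : Claim_equal_find_max_vert := by
  intro yel _hdom hpre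
  unfold Spec_find_max_vert find_max_vert find_max_vert_alt
  have hcol : ∀ j : Int,
      (fun i => PySem.Set.contains (PySem.Set.ofList yel) ((i : Int), j, "y"))
        = (fun i => decide ((i, j, "y") ∈ yel)) := by
    intro j; funext i; exact pv_contains_ofList yel (i, j, "y")
  simp only [pv_foldl_app, pv_foldl_pair, hcol]
  have h15 : ∀ j : Int, (15, j, "y") ∉ yel := by
    intro j h
    exact hpre _ h ⟨rfl, rfl⟩
  have hb : ∀ j : Int,
      pvBlackRowA yel j (PySem.List.pyRange 0 15 1) 0 0
        = pvGapScan ((PySem.List.pyRange 0 15 1).filter (fun i => decide ((i, j, "y") ∈ yel))) 0 (-1) := by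
    intro j
    have := pv_black_inv yel j (h15 j) 15 (by norm_num) 0 0 (by norm_num) (by norm_num)
      (by intro h; omega)
    norm_num at this
    convert this using 2
  have hy : ∀ j : Int,
      pvYellowRowA yel j (PySem.List.pyRange 0 15 1) 0 0
        = pvRunScan ((PySem.List.pyRange 0 15 1).filter (fun i => decide ((i, j, "y") ∈ yel))) 0 0 (-2) := by
    intro j
    have := pv_yellow_inv yel j 15 (by norm_num) 0 0 0 0 (-2) (by norm_num) (by norm_num)
      (by intro h; omega) (by intro _; exact ⟨rfl, by norm_num⟩)
    norm_num at this
    convert this using 2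
  simp only [List.nil_append]
  exact Prod.ext (by simp [List.map_congr_left fun j _ => (hb j).symm])
    (by simp [List.map_congr_left fun j _ => (hy j).symm])
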